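-- pv_equiv track=rewrite | github.com/1414vo/DIS-Radiomic-Features | src/utils.py | get_feature_groups
-- ===== SOURCE A (Python) =====
-- from typing import List, Dict, Tuple
--
-- def get_feature_groups(feature_names: List[str]) -> Dict[str, List[str]]:
--     """
--     Assuming a feature name of "original_GROUP_NAME", recovers
--     the features split by group.
--
--     Parameters
--     ----------
--     feature_names: list[str]
--         A list of feature names
--
--     Returns
--     -------
--     dict[str, list[str]]
--         A dictionary containing the list of features per group.
--     """
--     feature_groups = {}
--     for feature in feature_names:
--         feature_split = feature.split("_")
--         # Capitalize group name
--         group_name = feature_split[1].upper()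
--
--         if group_name not in feature_groups:
--             feature_groups[group_name] = []
--         feature_groups[group_name].append(feature)
--
--     return feature_groups
-- ===== SOURCE B (Python) =====
-- def get_feature_groups(feature_names):
--     """Group feature names by split('_')[1].upper(): dedup of keys in first-occurrence
--     order, then one filter pass per group (instead of incremental dict building)."""
--     def key(feature):
--         return feature.split("_")[1].upper()
--     groups = list(dict.fromkeys(key(f) for f in feature_names))
--     return {k: [f for f in feature_names if key(f) == k] for k in groups}
-- ===== Notes on version B (the rewrite author's own statement) =====
-- stated objective: alternative
-- what changed: Replaces A's single-pass incremental dict build (insert-empty-then-append per element) with a two-phase plan: first the deduplicated list of group keys in first-occurrence order, then one filter comprehension per key.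
import Mathlib
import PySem

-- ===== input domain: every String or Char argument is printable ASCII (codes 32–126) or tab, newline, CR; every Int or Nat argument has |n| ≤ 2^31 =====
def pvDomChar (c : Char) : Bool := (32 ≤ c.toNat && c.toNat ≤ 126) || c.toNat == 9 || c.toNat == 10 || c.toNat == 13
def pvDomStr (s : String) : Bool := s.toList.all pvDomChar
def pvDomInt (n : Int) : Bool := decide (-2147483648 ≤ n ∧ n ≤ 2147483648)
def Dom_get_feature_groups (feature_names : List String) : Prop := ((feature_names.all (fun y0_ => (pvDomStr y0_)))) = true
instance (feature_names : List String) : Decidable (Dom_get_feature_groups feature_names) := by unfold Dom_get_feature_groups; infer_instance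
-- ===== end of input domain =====

-- B replaces A's incremental dict building with "dedup the keys, then one filter per key";
-- same return value on all inputs where A returns (alternative decomposition, not faster).

-- shared key extraction: feature.split("_")[1].upper(). Python raises IndexError when the
-- split has fewer than 2 parts (pyGet? = none); those inputs are excluded by Pre_ below,
-- and the port uses "" there (unreachable under Pre_).
def groupKey (feature : String) : String :=
  PySem.Str.upper ((PySem.List.pyGet? ((PySem.Str.split? feature "_").getD []) 1).getD "")

-- ===== PORT A =====
def get_feature_groups (feature_names : List String) : List (String × List String) :=
  (feature_names.foldl (fun fg feature =>
      let group_name := groupKey feature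
      let fg := if fg.contains group_name then fg else fg.insert group_name ([] : List String)
      fg.modify group_name [] (fun l => l ++ [feature]))
    (PySem.Dict.empty : PySem.Dict String (List String))).items

-- ===== PORT B =====
def get_feature_groups_alt (feature_names : List String) : List (String × List String) :=
  let groups := PySem.List.dedup (feature_names.map groupKey)
  groups.map (fun k => (k, feature_names.filter (fun f => groupKey f == k)))

-- ===== PRECONDITION & SPEC =====
-- Pre_ excludes exactly the feature names with no '_' , on which Python A raises IndexError.
def Pre_get_feature_groups (feature_names : List String) : Prop :=
  ∀ f ∈ feature_names, 2 ≤ ((PySem.Str.split? f "_").getD []).length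
instance (feature_names : List String) : Decidable (Pre_get_feature_groups feature_names) := by unfold Pre_get_feature_groups; infer_instance

def pvWitness_get_feature_groups : List String := ["original_glcm_Contrast", "original_GLCM_Idm", "original_shape_Volume"]

def Spec_get_feature_groups (feature_names : List String) (out : List (String × List String)) : Prop := out = get_feature_groups_alt feature_names
instance (feature_names : List String) (out : List (String × List String)) : Decidable (Spec_get_feature_groups feature_names out) := by unfold Spec_get_feature_groups; infer_instance

-- ===== CLAIM (what is proved, stated in full; the proofs are below) =====
def Claim_equal_get_feature_groups : Prop := ∀ (feature_names : List String), Dom_get_feature_groups feature_names → Pre_get_feature_groups feature_names → Spec_get_feature_groups feature_names (get_feature_groups feature_names)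

-- ===== LEMMAS AND PROOFS =====

-- A's "insert [] if absent, then append" step is exactly Dict.modify with default [].
theorem step_eq_modify (fg : PySem.Dict String (List String)) (g f : String) :
    (if fg.contains g then fg else fg.insert g ([] : List String)).modify g []
        (fun l => l ++ [f])
      = fg.modify g [] (fun l => l ++ [f]) := by
  by_cases h : fg.contains g
  · simp [h]
  · simp only [h, Bool.false_eq_true, if_false]
    rw [PySem.Dict.modify, PySem.Dict.modify, PySem.Dict.getD_insert_self,
        PySem.Dict.insert_insert_self]
    have hg : fg.getD g [] = [] := by
      have : fg.get? g = none := by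
        rw [← Option.not_isSome_iff_eq_none, ← PySem.Dict.contains_eq_isSome_get?]
        simp [h]
      simp [PySem.Dict.getD, this]
    rw [hg]

-- The grouping fold's items ARE "deduped keys, each paired with its filter".
theorem items_grouped (fns : List String) :
    (fns.foldl (fun fg feature => fg.modify (groupKey feature) [] (fun l => l ++ [feature]))
      (PySem.Dict.empty : PySem.Dict String (List String))).items
    = (PySem.List.dedup (fns.map groupKey)).map
        (fun k => (k, fns.filter (fun f => groupKey f == k))) := by
  set d := fns.foldl (fun fg feature => fg.modify (groupKey feature) [] (fun l => l ++ [feature]))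
      (PySem.Dict.empty : PySem.Dict String (List String)) with hd
  have hnd : d.keys.Nodup := by
    rw [hd]
    exact PySem.Dict.nodup_keys_foldl_modify_key fns groupKey [] (fun d x l => l ++ [x]) _
      (by simp [PySem.Dict.keys_empty])
  have hkeys : d.keys = PySem.List.dedup (fns.map groupKey) := by
    rw [hd, PySem.Dict.keys_foldl_modify_key]
    simp [PySem.Dict.keys_empty, PySem.List.dedup_eq_ofList, PySem.Set.update,
      PySem.Set.ofList_eq_foldl]
  have hgetD : ∀ c, d.getD c [] = fns.filter (fun f => groupKey f == c) := by
    intro c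
    have hm : d = (fns.map (fun f => (groupKey f, f))).foldl
        (fun d p => d.modify p.1 [] (fun l => l ++ [p.2])) PySem.Dict.empty := by
      rw [hd, List.foldl_map]
    rw [hm, PySem.Dict.getD_foldl_modify_append]
    simp [List.filter_map, Function.comp_def]
  rw [PySem.Dict.items_eq_map_keys d hnd [], hkeys]
  exact List.map_congr_left (fun k _ => by rw [hgetD k])

-- ===== VERDICT (by name: the statement is the Claim_ definition above) =====
theorem get_feature_groups_spec : Claim_equal_get_feature_groups := by
  intro fns _ _
  show get_feature_groups fns = get_feature_groups_alt fns
  show (fns.foldl (fun fg feature =>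
      (if fg.contains (groupKey feature) then fg
       else fg.insert (groupKey feature) ([] : List String)).modify
        (groupKey feature) [] (fun l => l ++ [feature])) PySem.Dict.empty).items
    = (PySem.List.dedup (fns.map groupKey)).map
        (fun k => (k, fns.filter (fun f => groupKey f == k)))
  have h1 : fns.foldl (fun fg feature =>
        (if fg.contains (groupKey feature) then fg
         else fg.insert (groupKey feature) ([] : List String)).modify
          (groupKey feature) [] (fun l => l ++ [feature])) PySem.Dict.empty
      = fns.foldl (fun fg feature =>
          fg.modify (groupKey feature) [] (fun l => l ++ [feature])) PySem.Dict.empty :=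
    PySem.List.foldl_congr_mem _ _ _ _ (fun acc x _ => step_eq_modify acc (groupKey x) x)
  rw [h1]
  exact items_grouped fns
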